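-- pv_equiv track=rewrite | github.com/colerjstevenson/CourseCollector | cleaner.py | find_best_col
-- ===== SOURCE A (Python) =====
-- def find_best_col(cols, candidates):
--     """Return the first matching column name from candidates in cols, or None."""
--     lc = {c: c for c in cols}
--     for cand in candidates:
--         if cand in cols:
--             return cand
--     # try fuzzy: remove underscores
--     simplified = {c.replace("_", ""): c for c in cols}
--     for cand in candidates:
--         key = cand.replace("_", "")
--         if key in simplified:
--             return simplified[key]
--     return None
-- ===== SOURCE B (Python) =====
-- def find_best_col(cols, candidates):
--     """Return the first matching column name from candidates in cols, or None."""
--     simplified = {c.replace("_", ""): c for c in cols}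
--     exact = set(cols)
--     fallback = None
--     for cand in candidates:
--         if cand in exact:
--             return cand
--         if fallback is None:
--             key = cand.replace("_", "")
--             if key in simplified:
--                 fallback = simplified[key]
--     return fallback
-- ===== Notes on version B (the rewrite author's own statement) =====
-- stated objective: alternative
-- what changed: B makes a single pass over candidates with a first-fuzzy-hit accumulator (exact match returns immediately, the first underscore-stripped hit is remembered and returned after the loop) instead of A's two separate scans, and tests exact membership against a set built once.
import Mathlib
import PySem

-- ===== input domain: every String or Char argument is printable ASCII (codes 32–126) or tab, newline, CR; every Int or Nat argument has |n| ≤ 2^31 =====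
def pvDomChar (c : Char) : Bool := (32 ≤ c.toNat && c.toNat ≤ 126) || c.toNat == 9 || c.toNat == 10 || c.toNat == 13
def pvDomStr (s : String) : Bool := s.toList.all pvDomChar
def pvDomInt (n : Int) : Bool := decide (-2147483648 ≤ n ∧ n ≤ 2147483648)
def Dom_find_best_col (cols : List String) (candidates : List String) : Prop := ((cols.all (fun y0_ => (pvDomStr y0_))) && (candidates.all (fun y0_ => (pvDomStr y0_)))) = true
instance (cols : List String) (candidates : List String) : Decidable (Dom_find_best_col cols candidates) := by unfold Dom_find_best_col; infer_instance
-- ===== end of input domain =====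

-- B is a single pass over candidates with a first-fuzzy-hit accumulator instead of A's two scans.

-- ===== PORT A =====
-- first loop of A: `for cand in candidates: if cand in cols: return cand`
def fbcExactA (cols : List String) : List String → Option String
  | [] => none
  | cand :: rest =>
      if cols.contains cand then some cand else fbcExactA cols rest

-- second loop of A over the `simplified` dict
def fbcFuzzyA (simplified : PySem.Dict String String) : List String → Option String
  | [] => none
  | cand :: rest =>
      let key := PySem.Str.replace cand "_" ""
      if simplified.contains key then simplified.get? key
      else fbcFuzzyA simplified rest

def find_best_col (cols : List String) (candidates : List String) : Option String :=
  let _lc : PySem.Dict String String :=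
    cols.foldl (fun d c => d.insert c c) PySem.Dict.empty
  match fbcExactA cols candidates with
  | some cand => some cand
  | none =>
      let simplified : PySem.Dict String String :=
        cols.foldl (fun d c => d.insert (PySem.Str.replace c "_" "") c) PySem.Dict.empty
      fbcFuzzyA simplified candidates

-- ===== PORT B =====
-- B's single loop: return immediately on an exact hit, remember the first fuzzy hit
def fbcLoopB (exact : PySem.Set String) (simplified : PySem.Dict String String)
    (fallback : Option String) : List String → Option String
  | [] => fallback
  | cand :: rest =>
      if exact.contains cand then some cand
      else
        let fallback' :=
          if fallback.isNone then
            let key := PySem.Str.replace cand "_" ""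
            if simplified.contains key then simplified.get? key else fallback
          else fallback
        fbcLoopB exact simplified fallback' rest

def find_best_col_alt (cols : List String) (candidates : List String) : Option String :=
  let simplified : PySem.Dict String String :=
    cols.foldl (fun d c => d.insert (PySem.Str.replace c "_" "") c) PySem.Dict.empty
  let exact : PySem.Set String := PySem.Set.ofList cols
  fbcLoopB exact simplified none candidates

-- ===== PRECONDITION & SPEC =====
def Spec_find_best_col (cols : List String) (candidates : List String) (out : Option String) : Prop := out = find_best_col_alt cols candidates
instance (cols : List String) (candidates : List String) (out : Option String) : Decidable (Spec_find_best_col cols candidates out) := by unfold Spec_find_best_col; infer_instance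

-- ===== CLAIM (what is proved, stated in full; the proofs are below) =====
def Claim_equal_find_best_col : Prop := ∀ (cols : List String) (candidates : List String), Dom_find_best_col cols candidates → Spec_find_best_col cols candidates (find_best_col cols candidates)

-- ===== LEMMAS AND PROOFS =====

-- membership in the exact-set equals membership in cols
theorem fbc_set_contains (cols : List String) (c : String) :
    (PySem.Set.ofList cols).contains c = cols.contains c := by
  simp [PySem.Set.contains_eq_listContains]

-- the single B loop computes: first exact hit, else the carried fallback, else the first fuzzy hit
theorem fbcLoopB_eq (cols : List String) (simplified : PySem.Dict String String)
    (fallback : Option String) (cands : List String) :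
    fbcLoopB (PySem.Set.ofList cols) simplified fallback cands =
      (fbcExactA cols cands).or (fallback.or (fbcFuzzyA simplified cands)) := by
  induction cands generalizing fallback with
  | nil => cases fallback <;> simp [fbcLoopB, fbcExactA, fbcFuzzyA]
  | cons cand rest ih =>
      simp only [fbcLoopB, fbcExactA, fbcFuzzyA, fbc_set_contains]
      by_cases hc : cand ∈ cols
      · simp [hc]
      · simp only [List.contains_eq_mem, hc, decide_false, Bool.false_eq_true, if_false]
        cases fallback with
        | some f => simp [ih]
        | none =>
            simp only [Option.isNone_none, if_true]
            by_cases hk : simplified.contains (PySem.Str.replace cand "_" "")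
            · rw [PySem.Dict.contains_eq_isSome_get?] at hk
              cases hg : simplified.get? (PySem.Str.replace cand "_" "") with
              | none => rw [hg] at hk; simp at hk
              | some v =>
                  rw [PySem.Dict.contains_eq_isSome_get?]
                  simp [hg, ih]
            · simp [hk, ih]

-- ===== VERDICT (by name: the statement is the Claim_ definition above) =====
theorem find_best_col_spec : Claim_equal_find_best_col := by
  intro cols candidates _
  show find_best_col cols candidates = find_best_col_alt cols candidates
  unfold find_best_col find_best_col_alt
  rw [fbcLoopB_eq]
  cases h : fbcExactA cols candidates <;> simp
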